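-- pv_equiv track=rewrite | github.com/mattyb4/Bio465Capstone | scripts/getAlphafoldCifs.py | pick_urls
-- ===== SOURCE A (Python) =====
-- def pick_urls(record: dict, prefer: str = "cif") -> dict[str, str]:
--     urls = [v for v in record.values() if isinstance(v, str) and v.startswith("http")]
--
--     def pick_by_priority(priorities):
--         best_url = ""
--         best_score = -1
--         for u in urls:
--             lu = u.lower()
--             for endings, score in priorities:
--                 if any(lu.endswith(e) for e in endings):
--                     s = score + (1 if lu.endswith(".gz") else 0)
--                     if s > best_score:
--                         best_score = s
--                         best_url = u
--         return best_url
--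
--     if prefer == "cif":
--         structure_url = pick_by_priority([
--             ((".cif.gz", ".cif"), 300),
--             ((".bcif.gz", ".bcif"), 200),
--             ((".pdb.gz", ".pdb"), 100),
--         ])
--     else:
--         structure_url = pick_by_priority([
--             ((".pdb.gz", ".pdb"), 300),
--             ((".cif.gz", ".cif"), 200),
--             ((".bcif.gz", ".bcif"), 100),
--         ])
--     pae_url = pick_by_priority([
--         ((".pae.json.gz", ".pae.json"), 300),
--         ((".json.gz", ".json"), 100),
--     ])
--     return {"structure_url": structure_url, "pae_url": pae_url}
-- ===== SOURCE B (Python) =====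
-- def pick_urls(record: dict, prefer: str = "cif") -> dict[str, str]:
--     urls = [v for v in record.values() if isinstance(v, str) and v.startswith("http")]
--
--     def first_by_ending(endings):
--         for e in endings:
--             for u in urls:
--                 if u.lower().endswith(e):
--                     return u
--         return ""
--
--     if prefer == "cif":
--         structure_order = [".cif.gz", ".cif", ".bcif.gz", ".bcif", ".pdb.gz", ".pdb"]
--     else:
--         structure_order = [".pdb.gz", ".pdb", ".cif.gz", ".cif", ".bcif.gz", ".bcif"]
--     pae_order = [".pae.json.gz", ".pae.json", ".json.gz", ".json"]
--     return {"structure_url": first_by_ending(structure_order),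
--             "pae_url": first_by_ending(pae_order)}
-- ===== Notes on version B (the rewrite author's own statement) =====
-- stated objective: simpler
-- what changed: A scans urls once, re-scoring each against nested priority tiers while threading a running (best_url, best_score); B flattens the tiers into one ending list ordered by descending effective score (gz variant first) and returns the first url matching the best ending, with no scores at all.
import Mathlib
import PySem

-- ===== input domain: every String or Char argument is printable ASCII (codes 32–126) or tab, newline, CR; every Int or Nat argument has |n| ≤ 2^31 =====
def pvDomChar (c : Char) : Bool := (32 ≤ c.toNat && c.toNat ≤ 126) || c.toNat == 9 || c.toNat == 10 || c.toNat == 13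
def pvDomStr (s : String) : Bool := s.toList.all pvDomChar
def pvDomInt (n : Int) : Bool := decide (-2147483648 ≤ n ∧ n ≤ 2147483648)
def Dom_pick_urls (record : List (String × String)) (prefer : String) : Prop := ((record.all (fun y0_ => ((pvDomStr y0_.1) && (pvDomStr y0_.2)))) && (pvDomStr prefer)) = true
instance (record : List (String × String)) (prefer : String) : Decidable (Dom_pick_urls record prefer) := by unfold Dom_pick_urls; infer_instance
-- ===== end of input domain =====

-- B replaces A's url-major scan that threads a running best score through nested tier loops by a
-- single flattened ending list in descending effective-score order, returning the first url that
-- matches the best ending (objective: simpler decomposition, same cost).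

-- ===== PORT A =====
-- A's inner helper pick_by_priority: for each url, for each (endings, score) tier, update
-- (best_url, best_score) when score + gz-bonus beats the best so far.
def pickByPriority (urls : List String) (priorities : List (List String × Int)) : String :=
  (urls.foldl (fun st u =>
      let lu := PySem.Str.lower u
      priorities.foldl (fun st p =>
        if p.1.any (fun e => PySem.Str.endswith lu e) then
          let s := p.2 + (if PySem.Str.endswith lu ".gz" then 1 else 0)
          if s > st.2 then (u, s) else st
        else st) st)
    ("", (-1 : Int))).1

def pick_urls (record : List (String × String)) (prefer : String) : List (String × String) :=
  let urls := (PySem.Dict.ofList record).values.filter (fun v => PySem.Str.startswith v "http")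
  let structure_url :=
    if prefer = "cif" then
      pickByPriority urls [([".cif.gz", ".cif"], 300), ([".bcif.gz", ".bcif"], 200), ([".pdb.gz", ".pdb"], 100)]
    else
      pickByPriority urls [([".pdb.gz", ".pdb"], 300), ([".cif.gz", ".cif"], 200), ([".bcif.gz", ".bcif"], 100)]
  let pae_url := pickByPriority urls [([".pae.json.gz", ".pae.json"], 300), ([".json.gz", ".json"], 100)]
  [("structure_url", structure_url), ("pae_url", pae_url)]

-- ===== PORT B =====
-- B's helper first_by_ending: endings given in descending effective-score order; the first url
-- matching the best matching ending wins.
def firstByEnding (urls : List String) : List String → String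
  | [] => ""
  | e :: rest =>
    match urls.find? (fun u => PySem.Str.endswith (PySem.Str.lower u) e) with
    | some u => u
    | none => firstByEnding urls rest

def pick_urls_alt (record : List (String × String)) (prefer : String) : List (String × String) :=
  let urls := (PySem.Dict.ofList record).values.filter (fun v => PySem.Str.startswith v "http")
  let structureOrder :=
    if prefer = "cif" then [".cif.gz", ".cif", ".bcif.gz", ".bcif", ".pdb.gz", ".pdb"]
    else [".pdb.gz", ".pdb", ".cif.gz", ".cif", ".bcif.gz", ".bcif"]
  let paeOrder := [".pae.json.gz", ".pae.json", ".json.gz", ".json"]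
  [("structure_url", firstByEnding urls structureOrder), ("pae_url", firstByEnding urls paeOrder)]

-- ===== PRECONDITION & SPEC =====
def Spec_pick_urls (record : List (String × String)) (prefer : String) (out : List (String × String)) : Prop := out = pick_urls_alt record prefer
instance (record : List (String × String)) (prefer : String) (out : List (String × String)) : Decidable (Spec_pick_urls record prefer out) := by unfold Spec_pick_urls; infer_instance

-- ===== CLAIM (what is proved, stated in full; the proofs are below) =====
def Claim_equal_pick_urls : Prop := ∀ (record : List (String × String)) (prefer : String), Dom_pick_urls record prefer → Spec_pick_urls record prefer (pick_urls record prefer)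

-- ===== LEMMAS AND PROOFS =====

-- the score of the first ending of the flattened (ending, effective score) list that lu ends with
def mscore : List (String × Int) → String → Option Int
  | [], _ => none
  | (e, s) :: rest, lu => if PySem.Str.endswith lu e then some s else mscore rest lu

-- A's per-url update, expressed through mscore
def stepA (L : List (String × Int)) (st : String × Int) (u : String) : String × Int :=
  match mscore L (PySem.Str.lower u) with
  | none => st
  | some s => if s > st.2 then (u, s) else st

-- a priority tier (gz-ending, plain ending, score) flattened to (ending, effective score) pairs
def flattenTiers : List (String × String × Int) → List (String × Int)
  | [] => []
  | (g, n, sc) :: rest => (g, sc + 1) :: (n, sc) :: flattenTiers rest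

lemma ew_trans {lu a b : String} (hab : a.toList <:+ b.toList)
    (h : PySem.Str.endswith lu b = true) : PySem.Str.endswith lu a = true := by
  simp only [PySem.Str.endswith_eq, PySem.Chars.endswith_iff] at h ⊢
  exact hab.trans h

lemma ew_excl {lu a b : String} (h1 : ¬ a.toList <:+ b.toList) (h2 : ¬ b.toList <:+ a.toList)
    (ha : PySem.Str.endswith lu a = true) : PySem.Str.endswith lu b = false := by
  simp only [PySem.Str.endswith_eq, PySem.Chars.endswith_iff] at ha ⊢
  rw [Bool.eq_false_iff]
  simp only [ne_eq, PySem.Chars.endswith_iff]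
  intro hb
  rcases List.suffix_or_suffix_of_suffix ha hb with h | h
  · exact h1 h
  · exact h2 h

lemma mscore_mem {L : List (String × Int)} {lu : String} {x : Int}
    (h : mscore L lu = some x) : ∃ p ∈ L, p.2 = x := by
  induction L with
  | nil => simp [mscore] at h
  | cons p rest ih =>
    obtain ⟨e, s⟩ := p
    simp only [mscore] at h
    split at h
    · exact ⟨(e, s), by simp, by simpa using h⟩
    · obtain ⟨q, hq, hx⟩ := ih h
      exact ⟨q, by simp [hq], hx⟩

lemma flattenTiers_scores {P : List (String × String × Int)} {p : String × Int}
    (h : p ∈ flattenTiers P) : ∃ t ∈ P, p.2 = t.2.2 + 1 ∨ p.2 = t.2.2 := by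
  induction P with
  | nil => simp [flattenTiers] at h
  | cons t rest ih =>
    obtain ⟨g, n, sc⟩ := t
    simp only [flattenTiers, List.mem_cons] at h
    rcases h with h | h | h
    · exact ⟨(g, n, sc), by simp, by simp [h]⟩
    · exact ⟨(g, n, sc), by simp, by simp [h]⟩
    · obtain ⟨q, hq, hx⟩ := ih h
      exact ⟨q, by simp [hq], hx⟩

lemma mscore_flattenTiers_lt {rest : List (String × String × Int)} {lu : String} {x sc : Int}
    (h : ∀ t ∈ rest, t.2.2 + 1 < sc) (hx : mscore (flattenTiers rest) lu = some x) : x < sc := by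
  obtain ⟨p, hp, hpx⟩ := mscore_mem hx
  obtain ⟨t, ht, hc⟩ := flattenTiers_scores hp
  have := h t ht
  omega

lemma stepA_eq_self {L : List (String × Int)} {st : String × Int} {u : String}
    (h : ∀ x, mscore L (PySem.Str.lower u) = some x → x ≤ st.2) : stepA L st u = st := by
  unfold stepA
  split
  · rfl
  · next x hx =>
    have := h x hx
    split
    · omega
    · rfl

-- per-url lemma: A's sequential tier fold equals a single mscore-based update over the flattened list
lemma tier_fold_eq (u : String) (st : String × Int) (P : List (String × String × Int))
    (hgz : ∀ t ∈ P, (".gz".toList <:+ t.1.toList) ∧ ¬ (".gz".toList <:+ t.2.1.toList) ∧ ¬ (t.2.1.toList <:+ ".gz".toList))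
    (hdesc : P.Pairwise (fun a b => b.2.2 + 1 < a.2.2)) :
    (P.map (fun t => ([t.1, t.2.1], t.2.2))).foldl
      (fun st p =>
        if p.1.any (fun e => PySem.Str.endswith (PySem.Str.lower u) e) then
          let s := p.2 + (if PySem.Str.endswith (PySem.Str.lower u) ".gz" then 1 else 0)
          if s > st.2 then (u, s) else st
        else st) st
    = stepA (flattenTiers P) st u := by
  induction P generalizing st with
  | nil => simp [stepA, mscore, flattenTiers]
  | cons t rest ih =>
    obtain ⟨g, n, sc⟩ := t
    have hrest_lt : ∀ x, mscore (flattenTiers rest) (PySem.Str.lower u) = some x → x < sc :=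
      fun x hx => mscore_flattenTiers_lt (fun q hq => (List.pairwise_cons.mp hdesc).1 q hq) hx
    have hhead := hgz (g, n, sc) (by simp)
    have ihr := fun st => ih st (fun q hq => hgz q (by simp [hq])) hdesc.tail
    simp only [List.map, List.foldl, flattenTiers]
    by_cases h1 : PySem.Str.endswith (PySem.Str.lower u) g = true
    · have hgzl : PySem.Str.endswith (PySem.Str.lower u) ".gz" = true := ew_trans hhead.1 h1
      rw [ihr]
      unfold stepA
      simp only [mscore, List.any, h1, Bool.true_or, if_true, hgzl]
      rcases hms : mscore (flattenTiers rest) (PySem.Str.lower u) with _ | x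
      · rfl
      · have := hrest_lt x hms
        split_ifs <;> simp_all <;> omega
    · by_cases h2 : PySem.Str.endswith (PySem.Str.lower u) n = true
      · have hgzl : PySem.Str.endswith (PySem.Str.lower u) ".gz" = false := ew_excl hhead.2.2 hhead.2.1 h2
        rw [ihr]
        unfold stepA
        simp only [mscore, List.any, h1, h2, Bool.false_eq_true, Bool.false_or, Bool.or_false, if_true, hgzl, if_false, add_zero]
        rcases hms : mscore (flattenTiers rest) (PySem.Str.lower u) with _ | x
        · rfl
        · have := hrest_lt x hms
          split_ifs <;> simp_all <;> omega
      · rw [ihr]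
        unfold stepA
        simp only [mscore, List.any, h1, h2, Bool.false_eq_true, Bool.or_self, if_false]

-- along urls whose mscore is < s, the tracked best score stays < s
lemma fold_lt {L : List (String × Int)} {s : Int} {l : List String} {st : String × Int}
    (h : ∀ u ∈ l, ∀ x, mscore L (PySem.Str.lower u) = some x → x < s)
    (hst : st.2 < s) : (l.foldl (stepA L) st).2 < s := by
  induction l generalizing st with
  | nil => simpa using hst
  | cons u rest ih =>
    simp only [List.foldl]
    apply ih (fun v hv => h v (by simp [hv]))
    unfold stepA
    split
    · exact hst
    · next x hx =>
      split
      · exact h u (by simp) x hx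
      · exact hst

-- along urls whose mscore is ≤ the tracked best score, the state never changes
lemma fold_keep {L : List (String × Int)} {l : List String} {st : String × Int}
    (h : ∀ u ∈ l, ∀ x, mscore L (PySem.Str.lower u) = some x → x ≤ st.2) :
    l.foldl (stepA L) st = st := by
  induction l with
  | nil => rfl
  | cons u rest ih =>
    simp only [List.foldl]
    rw [stepA_eq_self (h u (by simp))]
    exact ih (fun v hv => h v (by simp [hv]))

-- main exchange lemma: A's best-score fold equals B's ending-major first-match search
lemma fold_eq_firstByEnding (L : List (String × Int))
    (hpos : ∀ p ∈ L, (-1 : Int) < p.2)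
    (hdesc : L.Pairwise (fun a b => b.2 < a.2)) (urls : List String) :
    (urls.foldl (stepA L) ("", (-1 : Int))).1 = firstByEnding urls (L.map (·.1)) := by
  induction L with
  | nil =>
    have hconst : ∀ (l : List String) (st : String × Int), l.foldl (stepA []) st = st := by
      intro l
      induction l with
      | nil => intro st; rfl
      | cons u r ihr =>
        intro st
        simp only [List.foldl]
        rw [show stepA [] st u = st from rfl]
        exact ihr st
    rw [hconst]
    rfl
  | cons p rest ih =>
    obtain ⟨e, s⟩ := p
    by_cases hm : urls.find? (fun u => PySem.Str.endswith (PySem.Str.lower u) e) = none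
    · -- no url matches e: both sides fall through to rest
      have hnone : ∀ u ∈ urls, PySem.Str.endswith (PySem.Str.lower u) e = false := by
        intro u hu
        simpa using List.find?_eq_none.mp hm u hu
      have hcongr : ∀ (st : String × Int), ∀ u ∈ urls, stepA ((e, s) :: rest) st u = stepA rest st u := by
        intro st u hu
        unfold stepA
        simp only [mscore, hnone u hu, Bool.false_eq_true, if_false]
      rw [PySem.List.foldl_congr_mem urls _ _ _ hcongr]
      rw [ih (fun q hq => hpos q (by simp [hq])) hdesc.tail]
      simp only [List.map, firstByEnding, hm]
    · -- some url matches e: B returns the first one, and A's fold locks onto it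
      obtain ⟨u₀, hu₀⟩ := Option.ne_none_iff_exists'.mp hm
      obtain ⟨hmatch, pre, post, hsplit, hpre⟩ := List.find?_eq_some_iff_append.mp hu₀
      have hmatch' : PySem.Str.endswith (PySem.Str.lower u₀) e = true := hmatch
      have hrest_lt : ∀ q ∈ rest, q.2 < s := fun q hq => (List.pairwise_cons.mp hdesc).1 q hq
      have hpre' : ∀ u ∈ pre, ∀ x, mscore ((e, s) :: rest) (PySem.Str.lower u) = some x → x < s := by
        intro u hu x hx
        have hne : PySem.Str.endswith (PySem.Str.lower u) e = false := by
          have := hpre u hu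
          simpa only [Bool.not_eq_true'] using this
        rw [mscore, hne] at hx
        simp only [Bool.false_eq_true, if_false] at hx
        obtain ⟨q, hq, hqx⟩ := mscore_mem hx
        exact hqx ▸ hrest_lt q hq
      have hall_le : ∀ u, ∀ x, mscore ((e, s) :: rest) (PySem.Str.lower u) = some x → x ≤ s := by
        intro u x hx
        obtain ⟨q, hq, hqx⟩ := mscore_mem hx
        rcases List.mem_cons.mp hq with h | h
        · subst h; omega
        · have := hrest_lt q h; omega
      subst hsplit
      rw [List.foldl_append]
      have hlt : ((pre.foldl (stepA ((e, s) :: rest)) ("", (-1 : Int)))).2 < s :=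
        fold_lt hpre' (by have := hpos (e, s) (by simp); simpa using this)
      simp only [List.foldl]
      have hstep : ∀ st : String × Int, st.2 < s → stepA ((e, s) :: rest) st u₀ = (u₀, s) := by
        intro st hstlt
        unfold stepA
        simp only [mscore, hmatch', if_true]
        split
        · rfl
        · omega
      rw [hstep _ hlt, fold_keep (fun u _ x hx => hall_le u x hx)]
      simp only [List.map, firstByEnding, hu₀]

-- the three concrete instantiations
lemma pick_struct_cif (urls : List String) :
    pickByPriority urls [([".cif.gz", ".cif"], 300), ([".bcif.gz", ".bcif"], 200), ([".pdb.gz", ".pdb"], 100)]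
      = firstByEnding urls [".cif.gz", ".cif", ".bcif.gz", ".bcif", ".pdb.gz", ".pdb"] := by
  unfold pickByPriority
  refine Eq.trans (congrArg Prod.fst (PySem.List.foldl_congr_mem urls _
      (stepA (flattenTiers [(".cif.gz", ".cif", 300), (".bcif.gz", ".bcif", 200), (".pdb.gz", ".pdb", 100)])) _
      (fun st u _ => tier_fold_eq u st [(".cif.gz", ".cif", 300), (".bcif.gz", ".bcif", 200), (".pdb.gz", ".pdb", 100)] (by decide) (by decide))))
    (fold_eq_firstByEnding _ (by decide) (by decide) urls)

lemma pick_struct_pdb (urls : List String) :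
    pickByPriority urls [([".pdb.gz", ".pdb"], 300), ([".cif.gz", ".cif"], 200), ([".bcif.gz", ".bcif"], 100)]
      = firstByEnding urls [".pdb.gz", ".pdb", ".cif.gz", ".cif", ".bcif.gz", ".bcif"] := by
  unfold pickByPriority
  refine Eq.trans (congrArg Prod.fst (PySem.List.foldl_congr_mem urls _
      (stepA (flattenTiers [(".pdb.gz", ".pdb", 300), (".cif.gz", ".cif", 200), (".bcif.gz", ".bcif", 100)])) _
      (fun st u _ => tier_fold_eq u st [(".pdb.gz", ".pdb", 300), (".cif.gz", ".cif", 200), (".bcif.gz", ".bcif", 100)] (by decide) (by decide))))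
    (fold_eq_firstByEnding _ (by decide) (by decide) urls)

lemma pick_pae (urls : List String) :
    pickByPriority urls [([".pae.json.gz", ".pae.json"], 300), ([".json.gz", ".json"], 100)]
      = firstByEnding urls [".pae.json.gz", ".pae.json", ".json.gz", ".json"] := by
  unfold pickByPriority
  refine Eq.trans (congrArg Prod.fst (PySem.List.foldl_congr_mem urls _
      (stepA (flattenTiers [(".pae.json.gz", ".pae.json", 300), (".json.gz", ".json", 100)])) _
      (fun st u _ => tier_fold_eq u st [(".pae.json.gz", ".pae.json", 300), (".json.gz", ".json", 100)] (by decide) (by decide))))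
    (fold_eq_firstByEnding _ (by decide) (by decide) urls)

-- ===== VERDICT (by name: the statement is the Claim_ definition above) =====
theorem pick_urls_spec : Claim_equal_pick_urls := by
  intro record prefer _
  unfold Spec_pick_urls pick_urls pick_urls_alt
  by_cases hp : prefer = "cif" <;>
    simp only [hp, if_pos, if_neg, not_false_iff, pick_struct_cif, pick_struct_pdb, pick_pae]
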